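-- pv_equiv track=rewrite | github.com/BaeInpyo/ProgrammingExercise | Chapter06_Bruteforce/Boardcover/sjw_boardcover.py | solution
-- ===== SOURCE A (Python) =====
-- BLACK = '#'
--
-- WHITE = '.'
--
-- BLOCKS = [
--     [(0, 0), (0, 1), (1, 0)],
--     [(0, 0), (1, -1), (1, 0)],
--     [(0, 0), (1, 0), (1, 1)],
--     [(0, 0), (0, 1), (1, 1)]
-- ]
--
-- def inrange(num, end):
--     if 0 <= num < end:
--         return True
--     else:
--         return False
--
-- def solution(board, fill_once=False):
--     H = len(board)
--     W = len(board[0])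
--     ans = 0
--
--     # find first white pane from (x, y)
--     x_white, y_white = None, None
--     for i in range(H):
--         for j in range(W):
--             if board[i][j] == WHITE:
--                 x_white, y_white = i, j
--                 break
--
--         if x_white is not None and y_white is not None:
--             break
--
--     # all board are black
--     if x_white is None and y_white is None:
--         if fill_once:
--             return 1
--         else:
--             return 0
--
--     for block in BLOCKS:
--         p1, p2, p3 = [(x_white+a, y_white+b) for (a, b) in block]
--
--         # skip if block is not in board
--         if not (inrange(p1[0], H) and inrange(p1[1], W)
--                 and inrange(p2[0], H) and inrange(p2[1], W)
--                 and inrange(p3[0], H) and inrange(p3[1], W)):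
--             continue
--
--         if board[p1[0]][p1[1]] == WHITE and board[p2[0]][p2[1]] == WHITE and board[p3[0]][p3[1]] == WHITE:
--             # fill board
--             board[p1[0]][p1[1]] = BLACK
--             board[p2[0]][p2[1]] = BLACK
--             board[p3[0]][p3[1]] = BLACK
--
--             ans += solution(board, fill_once=True)
--
--             # unfill board
--             board[p1[0]][p1[1]] = WHITE
--             board[p2[0]][p2[1]] = WHITE
--             board[p3[0]][p3[1]] = WHITE
--
--     return ans
-- ===== SOURCE B (Python) =====
-- BLACK = '#'
--
-- WHITE = '.'
--
-- BLOCKS = [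
--     [(0, 0), (0, 1), (1, 0)],
--     [(0, 0), (1, -1), (1, 0)],
--     [(0, 0), (1, 0), (1, 1)],
--     [(0, 0), (0, 1), (1, 1)]
-- ]
--
-- def solution(board, fill_once=False):
--     H = len(board)
--     W = len(board[0])
--     white = frozenset((i, j) for i in range(H) for j in range(W)
--                       if board[i][j] == WHITE)
--     if not white:
--         return 1 if fill_once else 0
--
--     memo = {}
--
--     def count(white):
--         if white in memo:
--             return memo[white]
--         if not white:
--             return 1
--         x, y = min(white)
--         total = 0
--         for block in BLOCKS:
--             cells = [(x + a, y + b) for a, b in block]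
--             if all(0 <= p < H and 0 <= q < W and (p, q) in white
--                    for p, q in cells):
--                 total += count(white - frozenset(cells))
--         memo[white] = total
--         return total
--
--     return count(white)
-- ===== Notes on version B (the rewrite author's own statement) =====
-- stated objective: alternative
-- what changed: B replaces A's mutate-and-undo backtracking over the board with top-down dynamic programming: the board is converted once to the set of white-cell coordinates and a memoized count over that set (min = first white cell, set difference = placing a piece) computes each reachable subconfiguration once instead of re-exploring it.
-- outside the precondition, e.g. on solution([['.'], []], False): A returns 0, B raises IndexError; on solution([['.'], [], ['.']], True): A returns 0, B raises IndexError
import Mathlib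
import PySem

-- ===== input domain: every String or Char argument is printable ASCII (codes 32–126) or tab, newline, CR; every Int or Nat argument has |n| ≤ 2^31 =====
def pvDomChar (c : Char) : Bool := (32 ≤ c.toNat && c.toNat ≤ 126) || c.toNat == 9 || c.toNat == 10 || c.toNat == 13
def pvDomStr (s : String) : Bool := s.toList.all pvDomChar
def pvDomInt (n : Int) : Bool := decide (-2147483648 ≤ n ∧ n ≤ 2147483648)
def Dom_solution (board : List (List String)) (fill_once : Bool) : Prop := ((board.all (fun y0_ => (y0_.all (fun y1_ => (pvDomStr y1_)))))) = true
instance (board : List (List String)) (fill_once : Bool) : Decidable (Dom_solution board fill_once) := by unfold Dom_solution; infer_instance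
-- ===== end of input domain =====

-- B replaces A's mutate-and-undo backtracking over the board with a memoized (top-down DP)
-- recursion on the set of white-cell coordinates; return values agree on Pre_ (A restores the
-- board it mutates, so neither program has a net side effect).

-- the module constant BLOCKS, shared data of both programs
def pvBLOCKS : List (List (Int × Int)) :=
  [[(0, 0), (0, 1), (1, 0)],
   [(0, 0), (1, -1), (1, 0)],
   [(0, 0), (1, 0), (1, 1)],
   [(0, 0), (0, 1), (1, 1)]]

-- ===== PORT A =====
-- helper inrange of Source A
def pvInrange (num e : Int) : Bool := if 0 ≤ num ∧ num < e then true else false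

-- board[i][j]; A only reads it at indices its inrange checks / Pre_ admit, where pyGet? is some
def pvCell (board : List (List String)) (i j : Int) : String :=
  ((PySem.List.pyGet? ((PySem.List.pyGet? board i).getD []) j).getD "")

-- board[i][j] = v; A only writes at indices validated by inrange (a no-op outside bounds)
def pvSetCell (board : List (List String)) (i j : Int) (v : String) : List (List String) :=
  PySem.List.pySetD board i (PySem.List.pySetD ((PySem.List.pyGet? board i).getD []) j v)

-- the three mutations 'board[pk[0]][pk[1]] = BLACK'
def pvFill (board : List (List String)) (ps : List (Int × Int)) : List (List String) :=
  ps.foldl (fun b p => pvSetCell b p.1 p.2 "#") board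

-- inner scan 'for j in range(W): if board[i][j] == WHITE: … break'
def pvFindJ (row : List String) : List Int → Option Int
  | [] => none
  | j :: js =>
      if (PySem.List.pyGet? row j).getD "" = "." then some j else pvFindJ row js

-- outer scan 'for i in range(H): …' that stops at the first white cell
def pvFindWhite (board : List (List String)) (W : Int) : List Int → Option (Int × Int)
  | [] => none
  | i :: is =>
      match pvFindJ ((PySem.List.pyGet? board i).getD []) (PySem.List.pyRange 0 W 1) with
      | some j => some (i, j)
      | none => pvFindWhite board W is

-- fuel: one unit per recursive call; each call blackens 3 white cells, so
-- (number of cells) + 1 always suffices (proved below); a pure totality guard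
def pvFuel (board : List (List String)) : Nat :=
  (board.map List.length).sum + 1

def pvSolveA : Nat → List (List String) → Bool → Int
  | 0, _, _ => 0
  | fuel + 1, board, fill_once =>
    let H : Int := board.length
    let W : Int := (((PySem.List.pyGet? board 0).getD []).length : Int)
    match pvFindWhite board W (PySem.List.pyRange 0 H 1) with
    | none => if fill_once then 1 else 0
    | some (x, y) =>
      pvBLOCKS.foldl (fun ans block =>
        let ps := block.map (fun ab => (x + ab.1, y + ab.2))
        match ps with
        | [p1, p2, p3] =>
          if !(pvInrange p1.1 H && pvInrange p1.2 W && pvInrange p2.1 H && pvInrange p2.2 W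
               && pvInrange p3.1 H && pvInrange p3.2 W) then ans
          else if pvCell board p1.1 p1.2 == "." && pvCell board p2.1 p2.2 == "."
                  && pvCell board p3.1 p3.2 == "." then
            ans + pvSolveA fuel (pvFill board ps) true
          else ans
        | _ => ans) 0  -- unreachable: every row of BLOCKS has exactly 3 offsets

def solution (board : List (List String)) (fill_once : Bool) : Int :=
  pvSolveA (pvFuel board) board fill_once

-- ===== PORT B =====
-- the comprehension {(i, j) : board[i][j] == WHITE} (row-major generation order)
def pvWhiteList (board : List (List String)) (H W : Int) : List (Int × Int) :=
  (PySem.List.pyRange 0 H 1).flatMap (fun i =>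
    (PySem.List.pyRange 0 W 1).filterMap (fun j =>
      if ((PySem.List.pyGet? ((PySem.List.pyGet? board i).getD []) j).getD "") = "."
      then some (i, j) else none))

-- the memo dictionary of Source B. Python keys the memo by frozenset (set equality); every set
-- reaching count is an order-preserving sub-list (filter) of the one row-major sorted,
-- duplicate-free initial white list, so list equality coincides with set equality here and
-- the Dict key is the list itself.
-- count(white) of Source B, returning (value, memo-after); memo lookup first, then the empty
-- base case, else recurse on white minus each placeable block, threading the memo through
-- the loop, and store the total. fuel = |white| + 1 at the top call suffices since every
-- recursive call removes the minimal white cell (a pure totality guard).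
def pvCountM : Nat → PySem.Dict (List (Int × Int)) Int → PySem.Set (Int × Int) → Int → Int →
    Int × PySem.Dict (List (Int × Int)) Int
  | 0, m, _, _, _ => (0, m)
  | fuel + 1, m, white, H, W =>
    match PySem.Dict.get? m white with
    | some v => (v, m)
    | none =>
      if white = [] then (1, m)
      else
        match PySem.List.min2? white (fun c => c.1) (fun c => c.2) with
        | none => (1, m)  -- unreachable: white is nonempty
        | some (x, y) =>
          let r := pvBLOCKS.foldl (fun (acc : Int × PySem.Dict (List (Int × Int)) Int) block =>
            let cells := block.map (fun ab => (x + ab.1, y + ab.2))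
            if cells.all (fun c =>
                 decide (0 ≤ c.1) && decide (c.1 < H) && decide (0 ≤ c.2) && decide (c.2 < W)
                 && PySem.Set.contains white c) then
              let s := pvCountM fuel acc.2 (PySem.Set.diff white (PySem.Set.ofList cells)) H W
              (acc.1 + s.1, s.2)
            else acc) ((0 : Int), m)
          (r.1, PySem.Dict.insert r.2 white r.1)

def solution_alt (board : List (List String)) (fill_once : Bool) : Int :=
  let H : Int := board.length
  let W : Int := (((PySem.List.pyGet? board 0).getD []).length : Int)
  let white : PySem.Set (Int × Int) := PySem.Set.ofList (pvWhiteList board H W)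
  if white = [] then (if fill_once then 1 else 0)
  else (pvCountM (white.length + 1) PySem.Dict.empty white H W).1

-- ===== PRECONDITION & SPEC =====
-- Pre_ excludes the empty board (board[0] raises IndexError) and boards with a row shorter
-- than the first row: there board[i][j] raises IndexError on A's scans on almost all inputs
-- (and B's comprehension always raises); the rare returns A still produces on such ragged
-- boards depend on its scan stopping early and are excluded with them.
def Pre_solution (board : List (List String)) (fill_once : Bool) : Prop :=
  board ≠ [] ∧ ∀ row ∈ board, (board.headD []).length ≤ row.length
instance (board : List (List String)) (fill_once : Bool) : Decidable (Pre_solution board fill_once) := by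
  unfold Pre_solution; infer_instance

def pvWitness_solution : List (List String) × Bool := ([[".", "."], [".", "#"]], false)

def Spec_solution (board : List (List String)) (fill_once : Bool) (out : Int) : Prop := out = solution_alt board fill_once
instance (board : List (List String)) (fill_once : Bool) (out : Int) : Decidable (Spec_solution board fill_once out) := by unfold Spec_solution; infer_instance

-- ===== CLAIM (what is proved, stated in full; the proofs are below) =====
def Claim_equal_solution : Prop := ∀ (board : List (List String)) (fill_once : Bool), Dom_solution board fill_once → Pre_solution board fill_once → Spec_solution board fill_once (solution board fill_once)

-- ===== LEMMAS AND PROOFS =====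

-- the pure (memo-free) value of count: the reference recursion the memo table caches
def pvCountB : Nat → PySem.Set (Int × Int) → Int → Int → Int
  | 0, _, _, _ => 0
  | fuel + 1, white, H, W =>
    if white = [] then 1
    else
      match PySem.List.min2? white (fun c => c.1) (fun c => c.2) with
      | none => 1
      | some (x, y) =>
        pvBLOCKS.foldl (fun total block =>
          let cells := block.map (fun ab => (x + ab.1, y + ab.2))
          if cells.all (fun c =>
               decide (0 ≤ c.1) && decide (c.1 < H) && decide (0 ≤ c.2) && decide (c.2 < W)
               && PySem.Set.contains white c) then
            total + pvCountB fuel (PySem.Set.diff white (PySem.Set.ofList cells)) H W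
          else total) 0

theorem pySetD_of_nonneg {α : Type} (xs : List α) (i : Int) (v : α) (h0 : 0 ≤ i) (h1 : i < xs.length) :
    PySem.List.pySetD xs i v = xs.set i.toNat v := by
  simp [PySem.List.pySetD, PySem.List.pySet?, PySem.List.pyIdx?, h0, h1]

theorem pySetD_of_ge {α : Type} (xs : List α) (i : Int) (v : α) (h0 : 0 ≤ i) (h1 : (xs.length : Int) ≤ i) :
    PySem.List.pySetD xs i v = xs := by
  have h2 : ¬ (i < (xs.length : Int)) := by omega
  simp [PySem.List.pySetD, PySem.List.pySet?, PySem.List.pyIdx?, h0, h2]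

theorem len_pySetD {α : Type} (xs : List α) (i : Int) (v : α) :
    (PySem.List.pySetD xs i v).length = xs.length := by
  simp only [PySem.List.pySetD, PySem.List.pySet?]
  cases PySem.List.pyIdx? xs.length i <;> simp

theorem pyGet?_nonneg' {α : Type} (xs : List α) (i : Int) (h0 : 0 ≤ i) :
    PySem.List.pyGet? xs i = xs[i.toNat]? := PySem.List.pyGet?_of_nonneg xs h0

theorem row_setCell (b : List (List String)) (i j i' : Int) (v : String) (h0 : 0 ≤ i) (h0' : 0 ≤ i') :
    (PySem.List.pyGet? (pvSetCell b i j v) i').getD [] =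
      if i' = i ∧ i < b.length then PySem.List.pySetD ((PySem.List.pyGet? b i).getD []) j v
      else (PySem.List.pyGet? b i').getD [] := by
  unfold pvSetCell
  by_cases hib : i < (b.length : Int)
  · rw [pySetD_of_nonneg _ _ _ h0 (by omega)]
    rw [pyGet?_nonneg' _ _ h0', pyGet?_nonneg' _ _ h0']
    by_cases he : i' = i
    · subst he
      rw [List.getElem?_set_self (by omega)]
      simp [hib]
    · rw [List.getElem?_set_ne (by omega)]
      simp [he]
  · rw [pySetD_of_ge _ _ _ h0 (by omega)]
    have : ¬ (i' = i ∧ (i : Int) < b.length) := by omega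
    simp [this]

theorem len_row_setCell (b : List (List String)) (i j i' : Int) (v : String) (h0 : 0 ≤ i) (h0' : 0 ≤ i') :
    ((PySem.List.pyGet? (pvSetCell b i j v) i').getD []).length =
      ((PySem.List.pyGet? b i').getD []).length := by
  rw [row_setCell b i j i' v h0 h0']
  split
  · next h => rw [len_pySetD, h.1]
  · rfl

theorem len_setCell (b : List (List String)) (i j : Int) (v : String) :
    (pvSetCell b i j v).length = b.length := by
  unfold pvSetCell; rw [len_pySetD]

theorem cell_setCell (b : List (List String)) (i j i' j' : Int) (v : String)
    (h0 : 0 ≤ i) (hj0 : 0 ≤ j) (h0' : 0 ≤ i') (hj0' : 0 ≤ j')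
    (hib : i < b.length) (hjb : j < ((PySem.List.pyGet? b i).getD []).length) :
    pvCell (pvSetCell b i j v) i' j' = if i' = i ∧ j' = j then v else pvCell b i' j' := by
  unfold pvCell
  rw [row_setCell b i j i' v h0 h0']
  by_cases he : i' = i
  · subst he
    rw [if_pos ⟨rfl, hib⟩]
    rw [pySetD_of_nonneg _ _ _ hj0 hjb]
    rw [pyGet?_nonneg' _ _ hj0', pyGet?_nonneg' _ _ hj0']
    by_cases hj : j' = j
    · subst hj
      rw [List.getElem?_set_self (by omega)]
      simp
    · rw [List.getElem?_set_ne (by omega)]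
      simp [hj]
  · rw [if_neg (by tauto)]
    simp [he]

theorem len_fill (b : List (List String)) (ps : List (Int × Int)) :
    (pvFill b ps).length = b.length := by
  induction ps generalizing b with
  | nil => rfl
  | cons p ps ih => rw [pvFill, List.foldl_cons, ← pvFill, ih, len_setCell]

theorem len_row_fill (b : List (List String)) (ps : List (Int × Int)) (i' : Int)
    (hps : ∀ p ∈ ps, 0 ≤ p.1) (h0' : 0 ≤ i') :
    ((PySem.List.pyGet? (pvFill b ps) i').getD []).length =
      ((PySem.List.pyGet? b i').getD []).length := by
  induction ps generalizing b with
  | nil => rfl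
  | cons p ps ih =>
      rw [pvFill, List.foldl_cons, ← pvFill, ih _ (fun q hq => hps q (by simp [hq])),
        len_row_setCell _ _ _ _ _ (hps p (by simp)) h0']

theorem cell_fill (b : List (List String)) (ps : List (Int × Int)) (i' j' : Int)
    (hps : ∀ p ∈ ps, 0 ≤ p.1 ∧ p.1 < b.length ∧ 0 ≤ p.2 ∧ p.2 < ((PySem.List.pyGet? b p.1).getD []).length)
    (h0' : 0 ≤ i') (hj0' : 0 ≤ j') :
    pvCell (pvFill b ps) i' j' = if (i', j') ∈ ps then "#" else pvCell b i' j' := by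
  induction ps generalizing b with
  | nil => simp [pvFill]
  | cons p ps ih =>
      rw [pvFill, List.foldl_cons, ← pvFill]
      obtain ⟨hp1, hp2, hp3, hp4⟩ := hps p (by simp)
      rw [ih _ (by
        intro q hq
        obtain ⟨a1, a2, a3, a4⟩ := hps q (by simp [hq])
        refine ⟨a1, ?_, a3, ?_⟩
        · rw [len_setCell]; exact a2
        · rw [len_row_setCell _ _ _ _ _ hp1 a1]; exact a4)]
      rw [cell_setCell _ _ _ _ _ _ hp1 hp3 h0' hj0' hp2 hp4]
      by_cases hmem : (i', j') ∈ ps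
      · simp [hmem]
      · by_cases he : i' = p.1 ∧ j' = p.2
        · have : (i', j') = p := by obtain ⟨h1, h2⟩ := he; exact Prod.ext h1 h2
          simp [he]
        · have : (i', j') ≠ p := by
            intro hc; exact he ⟨congrArg Prod.fst hc, congrArg Prod.snd hc⟩
          simp [hmem, he, this]

def pvLex (a b : Int × Int) : Prop := a.1 < b.1 ∨ (a.1 = b.1 ∧ a.2 < b.2)

theorem mem_whiteList (b : List (List String)) (H W : Int) (c : Int × Int) :
    c ∈ pvWhiteList b H W ↔ (0 ≤ c.1 ∧ c.1 < H ∧ 0 ≤ c.2 ∧ c.2 < W ∧ pvCell b c.1 c.2 = ".") := by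
  obtain ⟨i, j⟩ := c
  simp only [pvWhiteList, List.mem_flatMap, List.mem_filterMap, PySem.List.mem_pyRange_one, pvCell]
  constructor
  · rintro ⟨i', ⟨hi1, hi2⟩, j', ⟨hj1, hj2⟩, hc⟩
    split at hc
    · next hw =>
        obtain ⟨rfl, rfl⟩ := Prod.mk.injEq .. |>.mp (Option.some.inj hc)
        exact ⟨hi1, hi2, hj1, hj2, hw⟩
    · exact absurd hc (by simp)
  · rintro ⟨h1, h2, h3, h4, h5⟩
    exact ⟨i, ⟨h1, h2⟩, j, ⟨h3, h4⟩, by simp [h5]⟩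

theorem pairwise_whiteList (b : List (List String)) (H W : Int) :
    (pvWhiteList b H W).Pairwise pvLex := by
  unfold pvWhiteList
  apply List.pairwise_flatMap.mpr
  constructor
  · intro i _
    refine List.Pairwise.filterMap _ ?_ (PySem.List.pairwise_lt_pyRange_one 0 W)
    intro j j' hlt c hc c' hc'
    split at hc <;> simp_all
    obtain ⟨-, rfl⟩ := hc'
    obtain rfl := hc
    right
    exact ⟨rfl, hlt⟩
  · refine (PySem.List.pairwise_lt_pyRange_one 0 H).imp ?_
    intro i i' hlt x hx y hy
    simp only [List.mem_filterMap] at hx hy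
    obtain ⟨j, -, hj⟩ := hx
    obtain ⟨j', -, hj'⟩ := hy
    split at hj <;> simp_all
    obtain ⟨-, rfl⟩ := hj'
    obtain rfl := hj
    exact Or.inl hlt

theorem nodup_whiteList (b : List (List String)) (H W : Int) :
    (pvWhiteList b H W).Nodup :=
  (pairwise_whiteList b H W).imp (by
    intro a c h
    rcases h with h | ⟨h1, h2⟩
    · intro he; rw [he] at h; omega
    · intro he; rw [he] at h2; omega)

theorem findJ_eq (row : List String) (i : Int) (js : List Int) :
    (pvFindJ row js).map (fun j => (i, j)) =
      (js.filterMap (fun j =>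
        if (PySem.List.pyGet? row j).getD "" = "." then some (i, j) else none)).head? := by
  induction js with
  | nil => rfl
  | cons j js ih =>
      rw [pvFindJ, List.filterMap_cons]
      split
      · next h => simp
      · next h => exact ih

theorem findWhite_eq (b : List (List String)) (W : Int) (is : List Int) :
    pvFindWhite b W is =
      (is.flatMap (fun i =>
        (PySem.List.pyRange 0 W 1).filterMap (fun j =>
          if ((PySem.List.pyGet? ((PySem.List.pyGet? b i).getD []) j).getD "") = "."
          then some (i, j) else none))).head? := by
  induction is with
  | nil => rfl
  | cons i is ih =>
      rw [pvFindWhite, List.flatMap_cons, List.head?_append]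
      rw [← findJ_eq ((PySem.List.pyGet? b i).getD []) i]
      cases h : pvFindJ ((PySem.List.pyGet? b i).getD []) (PySem.List.pyRange 0 W 1) with
      | some j => simp
      | none => simp [ih]

theorem findWhite_eq_head (b : List (List String)) (H W : Int) :
    pvFindWhite b W (PySem.List.pyRange 0 H 1) = (pvWhiteList b H W).head? :=
  findWhite_eq b W _

theorem foldl_stay {α β : Type} (f : Option β → α → Option β) (m : β) (t : List α)
    (h : ∀ x ∈ t, f (some m) x = some m) : t.foldl f (some m) = some m := by
  induction t with
  | nil => rfl
  | cons x t ih =>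
      rw [List.foldl_cons, h x (by simp)]
      exact ih (fun y hy => h y (by simp [hy]))

theorem min2_eq_head (l : List (Int × Int)) (hp : l.Pairwise pvLex) :
    PySem.List.min2? l (fun c => c.1) (fun c => c.2) = l.head? := by
  cases l with
  | nil => rfl
  | cons m t =>
      rw [List.head?_cons, PySem.List.min2?, List.foldl_cons]
      show List.foldl _ (some m) t = some m
      refine foldl_stay _ m t ?_
      intro x hx
      show (if (decide (x.1 < m.1) || !decide (m.1 < x.1) && decide (x.2 < m.2)) = true
            then some x else some m) = some m
      rw [if_neg]
      have := (List.pairwise_cons.mp hp).1 x hx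
      simp only [pvLex] at this
      simp only [Bool.or_eq_true, Bool.and_eq_true, decide_eq_true_eq, Bool.not_eq_true',
        decide_eq_false_iff_not]
      omega

theorem whiteList_fill (b : List (List String)) (ps : List (Int × Int)) (H W : Int)
    (hH : H = b.length)
    (hrect : ∀ i : Int, 0 ≤ i → i < b.length → W ≤ ((PySem.List.pyGet? b i).getD []).length)
    (hps : ∀ p ∈ ps, 0 ≤ p.1 ∧ p.1 < H ∧ 0 ≤ p.2 ∧ p.2 < W) :
    pvWhiteList (pvFill b ps) H W = (pvWhiteList b H W).filter (fun c => !decide (c ∈ ps)) := by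
  have hps' : ∀ p ∈ ps, 0 ≤ p.1 ∧ p.1 < b.length ∧ 0 ≤ p.2
      ∧ p.2 < ((PySem.List.pyGet? b p.1).getD []).length := by
    intro p hp
    obtain ⟨h1, h2, h3, h4⟩ := hps p hp
    exact ⟨h1, by omega, h3, by have := hrect p.1 h1 (by omega); omega⟩
  unfold pvWhiteList
  rw [List.filter_flatMap]
  refine List.flatMap_congr ?_
  intro i hi
  rw [List.filter_filterMap]
  refine List.filterMap_congr ?_
  intro j hj
  rw [PySem.List.mem_pyRange_one] at hi hj
  show (if pvCell (pvFill b ps) i j = "." then some (i, j) else none) =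
    Option.filter (fun c => !decide (c ∈ ps)) (if pvCell b i j = "." then some (i, j) else none)
  rw [cell_fill b ps i j hps' hi.1 hj.1]
  by_cases hmem : (i, j) ∈ ps
  · rw [if_pos hmem]
    rw [if_neg (by decide)]
    by_cases hw : pvCell b i j = "."
    · simp [hw, Option.filter, hmem]
    · simp [hw]
  · rw [if_neg hmem]
    by_cases hw : pvCell b i j = "."
    · simp [hw, Option.filter, hmem]
    · simp [hw]

theorem diff_shrinks (wl : List (Int × Int)) (cells : List (Int × Int)) (c : Int × Int)
    (hc : c ∈ wl) (hcc : c ∈ cells) :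
    (PySem.Set.diff wl (PySem.Set.ofList cells)).length < wl.length := by
  show (wl.filter _).length < wl.length
  rw [List.length_filter_lt_length_iff_exists]
  exact ⟨c, hc, by simp [PySem.Set.contains, PySem.Set.mem_ofList, hcc]⟩

theorem countB_fuel : ∀ f1 f2 (wl : PySem.Set (Int × Int)) (H W : Int),
    wl.Pairwise pvLex → wl.length < f1 → wl.length < f2 →
    pvCountB f1 wl H W = pvCountB f2 wl H W := by
  intro f1
  induction f1 with
  | zero => intro f2 wl H W _ h1 _; omega
  | succ n1 ih =>
      intro f2 wl H W hp h1 h2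
      cases f2 with
      | zero => omega
      | succ n2 =>
          by_cases hnil : wl = []
          · simp [hnil, pvCountB]
          · obtain ⟨c, t, rfl⟩ := List.exists_cons_of_ne_nil hnil
            obtain ⟨x, y⟩ := c
            simp only [pvCountB, if_neg hnil, min2_eq_head _ hp, List.head?_cons]
            refine PySem.List.foldl_congr_mem (l := pvBLOCKS) _ _ (0 : Int) ?_
            intro acc block hb
            set cells := block.map (fun ab => (x + ab.1, y + ab.2)) with hcells
            by_cases hcond : cells.all (fun c =>
               decide (0 ≤ c.1) && decide (c.1 < H) && decide (0 ≤ c.2) && decide (c.2 < W)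
               && PySem.Set.contains ((x, y) :: t) c) = true
            · rw [if_pos hcond, if_pos hcond]
              congr 1
              have hxy : (x, y) ∈ cells := by
                simp only [List.mem_cons, List.not_mem_nil, or_false, pvBLOCKS] at hb
                rcases hb with rfl | rfl | rfl | rfl <;> simp [hcells]
              have hlt := diff_shrinks ((x, y) :: t) cells (x, y) (by simp) hxy
              exact ih n2 _ H W (List.Pairwise.filter _ hp) (by omega) (by omega)
            · rw [if_neg hcond, if_neg hcond]

-- the memo invariant: unique keys, every key sorted, every value the pure count of its key
def pvInv (H W : Int) (m : PySem.Dict (List (Int × Int)) Int) : Prop :=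
  m.keys.Nodup ∧ ∀ kv ∈ m.items, kv.1.Pairwise pvLex ∧ kv.2 = pvCountB (kv.1.length + 1) kv.1 H W

theorem countM_eq (H W : Int) : ∀ (f : Nat) (m : PySem.Dict (List (Int × Int)) Int)
    (wl : PySem.Set (Int × Int)), pvInv H W m → wl.Pairwise pvLex → wl.length < f →
    (pvCountM f m wl H W).1 = pvCountB f wl H W ∧ pvInv H W (pvCountM f m wl H W).2 := by
  intro f
  induction f with
  | zero => intro m wl _ _ h; omega
  | succ n ih =>
      intro m wl hinv hp hlen
      cases hget : PySem.Dict.get? m wl with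
      | some v =>
          have hmem := PySem.Dict.mem_items_of_get?_eq_some _ hget
          have hv : v = pvCountB (wl.length + 1) wl H W := (hinv.2 _ hmem).2
          have : v = pvCountB (n + 1) wl H W := by
            rw [hv]; exact countB_fuel _ _ _ H W hp (by omega) hlen
          simp only [pvCountM, hget]
          exact ⟨this, hinv⟩
      | none =>
          by_cases hnil : wl = []
          · subst hnil
            simp only [pvCountM, hget, pvCountB]
            exact ⟨rfl, hinv⟩
          · obtain ⟨c, t, rfl⟩ := List.exists_cons_of_ne_nil hnil
            obtain ⟨x, y⟩ := c
            have hfold : ∀ (bs : List (List (Int × Int))), (∀ b ∈ bs, b ∈ pvBLOCKS) →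
                ∀ (acc : Int) (m' : PySem.Dict (List (Int × Int)) Int), pvInv H W m' →
                (bs.foldl (fun (a : Int × PySem.Dict (List (Int × Int)) Int) block =>
                   let cells := block.map (fun ab => (x + ab.1, y + ab.2))
                   if cells.all (fun c =>
                        decide (0 ≤ c.1) && decide (c.1 < H) && decide (0 ≤ c.2) && decide (c.2 < W)
                        && PySem.Set.contains ((x, y) :: t) c) then
                     let s := pvCountM n a.2 (PySem.Set.diff ((x, y) :: t) (PySem.Set.ofList cells)) H W
                     (a.1 + s.1, s.2)
                   else a) (acc, m')).1 =
                  bs.foldl (fun (total : Int) block =>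
                   let cells := block.map (fun ab => (x + ab.1, y + ab.2))
                   if cells.all (fun c =>
                        decide (0 ≤ c.1) && decide (c.1 < H) && decide (0 ≤ c.2) && decide (c.2 < W)
                        && PySem.Set.contains ((x, y) :: t) c) then
                     total + pvCountB n (PySem.Set.diff ((x, y) :: t) (PySem.Set.ofList cells)) H W
                   else total) acc ∧
                pvInv H W (bs.foldl (fun (a : Int × PySem.Dict (List (Int × Int)) Int) block =>
                   let cells := block.map (fun ab => (x + ab.1, y + ab.2))
                   if cells.all (fun c =>
                        decide (0 ≤ c.1) && decide (c.1 < H) && decide (0 ≤ c.2) && decide (c.2 < W)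
                        && PySem.Set.contains ((x, y) :: t) c) then
                     let s := pvCountM n a.2 (PySem.Set.diff ((x, y) :: t) (PySem.Set.ofList cells)) H W
                     (a.1 + s.1, s.2)
                   else a) (acc, m')).2 := by
              intro bs
              induction bs with
              | nil => intro _ acc m' hm'; exact ⟨rfl, hm'⟩
              | cons b bs ihb =>
                  intro hbs acc m' hm'
                  simp only [List.foldl_cons]
                  set cells := b.map (fun ab => (x + ab.1, y + ab.2)) with hcells
                  by_cases hcond : cells.all (fun c =>
                       decide (0 ≤ c.1) && decide (c.1 < H) && decide (0 ≤ c.2) && decide (c.2 < W)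
                       && PySem.Set.contains ((x, y) :: t) c) = true
                  · rw [if_pos hcond, if_pos hcond]
                    have hxy : (x, y) ∈ cells := by
                      have hb := hbs b (by simp)
                      simp only [List.mem_cons, List.not_mem_nil, or_false, pvBLOCKS] at hb
                      rcases hb with rfl | rfl | rfl | rfl <;> simp [hcells]
                    have hlt := diff_shrinks ((x, y) :: t) cells (x, y) (by simp) hxy
                    obtain ⟨hval, hinv'⟩ := ih m' (PySem.Set.diff ((x, y) :: t) (PySem.Set.ofList cells))
                      hm' (List.Pairwise.filter _ hp) (by omega)
                    obtain ⟨hv2, hi2⟩ := ihb (fun q hq => hbs q (by simp [hq])) _ _ hinv'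
                    constructor
                    · rw [hv2, hval]
                    · exact hi2
                  · rw [if_neg hcond, if_neg hcond]
                    exact ihb (fun q hq => hbs q (by simp [hq])) acc m' hm'
            obtain ⟨hv, hi⟩ := hfold pvBLOCKS (fun _ h => h) 0 m hinv
            have hmin := min2_eq_head ((x, y) :: t) hp
            have hpure : pvCountB (n + 1) ((x, y) :: t) H W =
                pvBLOCKS.foldl (fun (total : Int) block =>
                   let cells := block.map (fun ab => (x + ab.1, y + ab.2))
                   if cells.all (fun c =>
                        decide (0 ≤ c.1) && decide (c.1 < H) && decide (0 ≤ c.2) && decide (c.2 < W)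
                        && PySem.Set.contains ((x, y) :: t) c) then
                     total + pvCountB n (PySem.Set.diff ((x, y) :: t) (PySem.Set.ofList cells)) H W
                   else total) 0 := by
              simp only [pvCountB, if_neg hnil, hmin, List.head?_cons]
            simp only [pvCountM, hget, if_neg hnil, hmin, List.head?_cons]
            refine ⟨by rw [hpure]; exact hv, ?_, ?_⟩
            · exact PySem.Dict.nodup_keys_insert _ _ _ hi.1
            · intro kv hkv
              rcases (PySem.Dict.mem_items_insert _ _ _ _).mp hkv with rfl | ⟨hold, -⟩
              · refine ⟨hp, ?_⟩
                show _ = pvCountB (((x, y) :: t).length + 1) ((x, y) :: t) H W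
                rw [hv, ← hpure]
                exact countB_fuel _ _ _ H W hp (by omega) (by omega)
              · exact hi.2 _ hold

def pvWr (b : List (List String)) : Nat := ((PySem.List.pyGet? b 0).getD []).length

theorem contains_whiteList (b : List (List String)) (H W : Int) (c : Int × Int) :
    PySem.Set.contains (pvWhiteList b H W) c =
      (decide (0 ≤ c.1) && decide (c.1 < H) && decide (0 ≤ c.2) && decide (c.2 < W)
        && decide (pvCell b c.1 c.2 = ".")) := by
  have hm := mem_whiteList b H W c
  show (pvWhiteList b H W).contains c = _
  rw [List.contains_eq_mem]
  simp only [← Bool.decide_and, and_assoc]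
  exact Bool.decide_congr hm

def pvRect (b : List (List String)) (W : Int) : Prop :=
  ∀ i : Int, 0 ≤ i → i < b.length → W ≤ ((PySem.List.pyGet? b i).getD []).length

theorem rect_fill (b : List (List String)) (ps : List (Int × Int)) (W : Int)
    (hps : ∀ p ∈ ps, 0 ≤ p.1) (h : pvRect b W) : pvRect (pvFill b ps) W := by
  intro i h0 h1
  rw [len_row_fill b ps i hps h0]
  rw [len_fill] at h1
  exact h i h0 h1

theorem if_tf (p : Prop) [Decidable p] : (if p then true else false) = decide p := by
  by_cases h : p <;> simp [h]

theorem step_eq (n : Nat) (b : List (List String)) (hrect : pvRect b (pvWr b : Int))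
    (ih : ∀ b' : List (List String), pvRect b' (pvWr b' : Int) →
      pvSolveA n b' true =
        pvCountB n (pvWhiteList b' b'.length (pvWr b' : Int)) b'.length (pvWr b' : Int))
    (x y a1 c1 a2 c2 a3 c3 : Int) (acc : Int) :
    (if !(pvInrange (x + a1) b.length && pvInrange (y + c1) (pvWr b : Int)
          && pvInrange (x + a2) b.length && pvInrange (y + c2) (pvWr b : Int)
          && pvInrange (x + a3) b.length && pvInrange (y + c3) (pvWr b : Int)) then acc
     else if pvCell b (x + a1) (y + c1) == "." && pvCell b (x + a2) (y + c2) == "."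
             && pvCell b (x + a3) (y + c3) == "." then
       acc + pvSolveA n (pvFill b [(x + a1, y + c1), (x + a2, y + c2), (x + a3, y + c3)]) true
     else acc)
    =
    (if [(x + a1, y + c1), (x + a2, y + c2), (x + a3, y + c3)].all (fun c =>
          decide (0 ≤ c.1) && decide (c.1 < (b.length : Int)) && decide (0 ≤ c.2)
          && decide (c.2 < (pvWr b : Int)) && PySem.Set.contains (pvWhiteList b b.length (pvWr b : Int)) c) then
       acc + pvCountB n (PySem.Set.diff (pvWhiteList b b.length (pvWr b : Int))
         (PySem.Set.ofList [(x + a1, y + c1), (x + a2, y + c2), (x + a3, y + c3)]))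
         b.length (pvWr b : Int)
     else acc) := by
  have hsplit : ∀ (C1 C2 : Bool) (X : Int),
      (if !C1 then acc else if C2 then X else acc) = (if C1 && C2 then X else acc) := by
    intro C1 C2 X; cases C1 <;> cases C2 <;> simp
  rw [hsplit]
  have hcond :
      ((pvInrange (x + a1) b.length && pvInrange (y + c1) (pvWr b : Int)
          && pvInrange (x + a2) b.length && pvInrange (y + c2) (pvWr b : Int)
          && pvInrange (x + a3) b.length && pvInrange (y + c3) (pvWr b : Int))
        && (pvCell b (x + a1) (y + c1) == "." && pvCell b (x + a2) (y + c2) == "."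
             && pvCell b (x + a3) (y + c3) == "."))
      = ([(x + a1, y + c1), (x + a2, y + c2), (x + a3, y + c3)].all (fun c =>
          decide (0 ≤ c.1) && decide (c.1 < (b.length : Int)) && decide (0 ≤ c.2)
          && decide (c.2 < (pvWr b : Int)) && PySem.Set.contains (pvWhiteList b b.length (pvWr b : Int)) c)) := by
    simp only [List.all_cons, List.all_nil, contains_whiteList, pvInrange, Bool.and_true, if_tf]
    apply Bool.eq_iff_iff.mpr
    simp only [Bool.and_eq_true, decide_eq_true_eq, beq_iff_eq]
    tauto
  rw [hcond]
  by_cases hc : ([(x + a1, y + c1), (x + a2, y + c2), (x + a3, y + c3)].all (fun c =>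
          decide (0 ≤ c.1) && decide (c.1 < (b.length : Int)) && decide (0 ≤ c.2)
          && decide (c.2 < (pvWr b : Int)) && PySem.Set.contains (pvWhiteList b b.length (pvWr b : Int)) c)) = true
  · rw [if_pos hc, if_pos hc]
    congr 1
    have hps : ∀ p ∈ [(x + a1, y + c1), (x + a2, y + c2), (x + a3, y + c3)],
        0 ≤ p.1 ∧ p.1 < (b.length : Int) ∧ 0 ≤ p.2 ∧ p.2 < (pvWr b : Int) := by
      simp only [List.all_cons, List.all_nil, Bool.and_eq_true, decide_eq_true_eq,
        Bool.and_true] at hc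
      intro p hp
      simp only [List.mem_cons, List.not_mem_nil, or_false] at hp
      rcases hp with rfl | rfl | rfl <;>
        exact ⟨by tauto, by tauto, by tauto, by tauto⟩
    rw [ih (pvFill b [(x + a1, y + c1), (x + a2, y + c2), (x + a3, y + c3)])
      (rect_fill b _ _ (fun p hp => (hps p hp).1)
        (by rw [show pvWr (pvFill b [(x + a1, y + c1), (x + a2, y + c2), (x + a3, y + c3)]) = pvWr b
              from len_row_fill b _ 0 (fun p hp => (hps p hp).1) le_rfl]
            exact hrect))]
    rw [show pvWr (pvFill b [(x + a1, y + c1), (x + a2, y + c2), (x + a3, y + c3)]) = pvWr b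
        from len_row_fill b _ 0 (fun p hp => (hps p hp).1) le_rfl]
    rw [len_fill]
    rw [whiteList_fill b _ b.length (pvWr b : Int) rfl hrect hps]
    congr 1
    show _ = List.filter _ _
    refine List.filter_congr ?_
    intro c hcm
    simp [List.contains_eq_mem, PySem.Set.mem_ofList]
  · rw [if_neg hc, if_neg hc]

theorem main_eq : ∀ (fuel : Nat) (b : List (List String)), pvRect b (pvWr b : Int) →
    pvSolveA fuel b true =
      pvCountB fuel (pvWhiteList b b.length (pvWr b : Int)) b.length (pvWr b : Int) := by
  intro fuel
  induction fuel with
  | zero => intro b _; rfl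
  | succ n ih =>
      intro b hrect
      show pvSolveA (n + 1) b true =
        pvCountB (n + 1)
          (pvWhiteList b b.length ((((PySem.List.pyGet? b 0).getD []).length : Nat) : Int))
          b.length ((((PySem.List.pyGet? b 0).getD []).length : Nat) : Int)
      have hfind := findWhite_eq_head b (b.length : Int)
        ((((PySem.List.pyGet? b 0).getD []).length : Nat) : Int)
      cases hwl : pvWhiteList b (b.length : Int)
          ((((PySem.List.pyGet? b 0).getD []).length : Nat) : Int) with
      | nil =>
          rw [hwl] at hfind
          simp [pvSolveA, pvCountB, hfind]
      | cons c t =>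
          rw [hwl] at hfind
          obtain ⟨xx, yy⟩ := c
          have hp : (pvWhiteList b (b.length : Int)
              ((((PySem.List.pyGet? b 0).getD []).length : Nat) : Int)).Pairwise pvLex :=
            pairwise_whiteList b _ _
          simp only [pvSolveA, pvCountB, hfind, min2_eq_head _ (hwl ▸ hp),
            List.head?_cons, if_neg (List.cons_ne_nil _ _)]
          rw [← hwl]
          refine PySem.List.foldl_congr_mem (l := pvBLOCKS) _ _ (0 : Int) ?_
          intro acc block hb
          simp only [List.mem_cons, List.not_mem_nil, or_false, pvBLOCKS] at hb
          rcases hb with rfl | rfl | rfl | rfl <;>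
            exact step_eq n b hrect ih xx yy _ _ _ _ _ _ acc

theorem len_whiteList_le (b : List (List String)) (hrect : pvRect b (pvWr b : Int)) :
    (pvWhiteList b (b.length : Int)
      ((((PySem.List.pyGet? b 0).getD []).length : Nat) : Int)).length ≤ (b.map List.length).sum := by
  show (pvWhiteList b (b.length : Int) (pvWr b : Int)).length ≤ (b.map List.length).sum
  unfold pvWhiteList
  rw [List.length_flatMap]
  have h1 : ∀ x ∈ (PySem.List.pyRange 0 (b.length : Int) 1).map (fun i =>
      ((PySem.List.pyRange 0 (pvWr b : Int) 1).filterMap (fun j =>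
        if ((PySem.List.pyGet? ((PySem.List.pyGet? b i).getD []) j).getD "") = "."
        then some (i, j) else none)).length), x ≤ pvWr b := by
    intro x hx
    simp only [List.mem_map] at hx
    obtain ⟨i, -, rfl⟩ := hx
    calc _ ≤ (PySem.List.pyRange 0 (pvWr b : Int) 1).length := List.length_filterMap_le _ _
    _ = pvWr b := by rw [PySem.List.length_pyRange_one]; omega
  have h2 := List.sum_le_card_nsmul _ _ h1
  rw [List.length_map, PySem.List.length_pyRange_one] at h2
  have h3 : ∀ x ∈ b.map List.length, pvWr b ≤ x := by
    intro x hx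
    simp only [List.mem_map] at hx
    obtain ⟨row, hrow, rfl⟩ := hx
    obtain ⟨k, hk, rfl⟩ := List.getElem_of_mem hrow
    have := hrect (k : Int) (by omega) (by omega)
    rw [PySem.List.pyGet?_natCast, List.getElem?_eq_getElem hk] at this
    simpa using this
  have h4 := List.card_nsmul_le_sum _ _ h3
  rw [List.length_map] at h4
  have h5 : (((b.length : Int)) - 0).toNat = b.length := by omega
  rw [h5] at h2
  simp only [smul_eq_mul] at h2 h4
  omega

theorem solveA_fo_irrel (n : Nat) (b : List (List String)) (fo : Bool) (c : Int × Int)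
    (h : pvFindWhite b ((((PySem.List.pyGet? b 0).getD []).length : Nat) : Int)
          (PySem.List.pyRange 0 (b.length : Int) 1) = some c) :
    pvSolveA (n + 1) b fo = pvSolveA (n + 1) b true := by
  obtain ⟨x, y⟩ := c
  simp only [pvSolveA, h]

theorem inv_empty (H W : Int) : pvInv H W PySem.Dict.empty := by
  constructor
  · exact PySem.Dict.nodup_keys_empty
  · intro kv hkv
    simp [PySem.Dict.empty] at hkv

theorem final (board : List (List String)) (fo : Bool)
    (hne : board ≠ []) (hrows : ∀ row ∈ board, (board.headD []).length ≤ row.length) :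
    solution board fo = solution_alt board fo := by
  have hW0 : pvWr board = (board.headD []).length := by
    unfold pvWr
    rw [PySem.List.pyGet?_zero, ← List.head?_eq_getElem?]
    cases board <;> rfl
  have hrect : pvRect board (pvWr board : Int) := by
    intro i h0 h1
    have hmem : ((PySem.List.pyGet? board i).getD []) ∈ board := by
      rw [PySem.List.pyGet?_of_nonneg board h0]
      have hlt : i.toNat < board.length := by omega
      rw [List.getElem?_eq_getElem hlt]
      exact List.getElem_mem _
    have := hrows _ hmem
    rw [hW0]
    exact_mod_cast this
  have hnodup := nodup_whiteList board (board.length : Int)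
    ((((PySem.List.pyGet? board 0).getD []).length : Nat) : Int)
  have hOf : PySem.Set.ofList (pvWhiteList board (board.length : Int)
        ((((PySem.List.pyGet? board 0).getD []).length : Nat) : Int))
      = pvWhiteList board (board.length : Int)
        ((((PySem.List.pyGet? board 0).getD []).length : Nat) : Int) :=
    PySem.Set.ofList_eq_self_of_nodup _ hnodup
  have hfind := findWhite_eq_head board (board.length : Int)
    ((((PySem.List.pyGet? board 0).getD []).length : Nat) : Int)
  by_cases hwl : pvWhiteList board (board.length : Int)
      ((((PySem.List.pyGet? board 0).getD []).length : Nat) : Int) = []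
  · rw [hwl] at hfind
    show pvSolveA ((board.map List.length).sum + 1) board fo = _
    simp only [pvSolveA, hfind]
    show _ = solution_alt board fo
    simp only [solution_alt, hOf]
    simp [hwl]
  · obtain ⟨c, t, hc⟩ := List.exists_cons_of_ne_nil hwl
    rw [hc, List.head?_cons] at hfind
    have hpair := pairwise_whiteList board (board.length : Int)
      ((((PySem.List.pyGet? board 0).getD []).length : Nat) : Int)
    calc solution board fo = pvSolveA ((board.map List.length).sum + 1) board fo := rfl
    _ = pvSolveA ((board.map List.length).sum + 1) board true :=
        solveA_fo_irrel _ board fo c hfind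
    _ = pvCountB ((board.map List.length).sum + 1)
          (pvWhiteList board (board.length : Int)
            ((((PySem.List.pyGet? board 0).getD []).length : Nat) : Int))
          (board.length : Int) ((((PySem.List.pyGet? board 0).getD []).length : Nat) : Int) :=
        main_eq _ board hrect
    _ = pvCountB ((pvWhiteList board (board.length : Int)
            ((((PySem.List.pyGet? board 0).getD []).length : Nat) : Int)).length + 1)
          (pvWhiteList board (board.length : Int)
            ((((PySem.List.pyGet? board 0).getD []).length : Nat) : Int))
          (board.length : Int) ((((PySem.List.pyGet? board 0).getD []).length : Nat) : Int) := by
        refine countB_fuel _ _ _ _ _ hpair ?_ ?_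
        · have := len_whiteList_le board hrect
          omega
        · omega
    _ = (pvCountM ((pvWhiteList board (board.length : Int)
            ((((PySem.List.pyGet? board 0).getD []).length : Nat) : Int)).length + 1)
          PySem.Dict.empty
          (pvWhiteList board (board.length : Int)
            ((((PySem.List.pyGet? board 0).getD []).length : Nat) : Int))
          (board.length : Int) ((((PySem.List.pyGet? board 0).getD []).length : Nat) : Int)).1 :=
        (countM_eq _ _ _ _ _ (inv_empty _ _) hpair (by omega)).1.symm
    _ = solution_alt board fo := by
        show _ = solution_alt board fo
        simp only [solution_alt, hOf]
        rw [if_neg hwl]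

-- ===== VERDICT (by name: the statement is the Claim_ definition above) =====
theorem solution_spec : Claim_equal_solution := by
  intro board fill_once hdom hpre
  unfold Spec_solution
  obtain ⟨hne, hrows⟩ := hpre
  exact final board fill_once hne hrows
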